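-- pv_equiv track=rewrite | github.com/rcalfredson/nvsl-analysis | src/plotting/reward_window_utils.py | training_window_label
-- ===== SOURCE A (Python) =====
-- from typing import Sequence
--
-- def training_window_label(selected_trainings: Sequence[int]) -> str:
--     if not selected_trainings:
--         return "all trainings"
--     if len(selected_trainings) == 1:
--         return f"T{selected_trainings[0] + 1}"
--     runs = []
--     start = prev = selected_trainings[0] + 1
--     for idx0 in selected_trainings[1:]:
--         cur = idx0 + 1
--         if cur == prev + 1:
--             prev = cur
--             continue
--         runs.append(f"T{start}" if start == prev else f"T{start}-T{prev}")
--         start = prev = cur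
--     runs.append(f"T{start}" if start == prev else f"T{start}-T{prev}")
--     return ", ".join(runs)
-- ===== SOURCE B (Python) =====
-- def training_window_label(selected_trainings):
--     if not selected_trainings:
--         return "all trainings"
--     vals = [x + 1 for x in selected_trainings]
--     # boundary detection: an element starts a run iff it has no predecessor or
--     # is not predecessor+1; it ends a run iff it has no successor or the
--     # successor is not it+1. Pair run starts with run ends positionally.
--     starts = [c for c, p in zip(vals, [None] + vals) if p is None or c != p + 1]
--     ends = [c for c, n in zip(vals, vals[1:] + [None]) if n is None or n != c + 1]
--     return ", ".join(f"T{s}" if s == e else f"T{s}-T{e}" for s, e in zip(starts, ends))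
-- ===== Notes on version B (the rewrite author's own statement) =====
-- stated objective: alternative
-- what changed: B replaces A's sequential accumulator loop by positional boundary detection: it zips each 1-based value with its predecessor and with its successor, filters out the run starts and the run ends as two independent lists, zips those lists into (start,end) runs and formats them; there is no running (start, prev) state.
import Mathlib
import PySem

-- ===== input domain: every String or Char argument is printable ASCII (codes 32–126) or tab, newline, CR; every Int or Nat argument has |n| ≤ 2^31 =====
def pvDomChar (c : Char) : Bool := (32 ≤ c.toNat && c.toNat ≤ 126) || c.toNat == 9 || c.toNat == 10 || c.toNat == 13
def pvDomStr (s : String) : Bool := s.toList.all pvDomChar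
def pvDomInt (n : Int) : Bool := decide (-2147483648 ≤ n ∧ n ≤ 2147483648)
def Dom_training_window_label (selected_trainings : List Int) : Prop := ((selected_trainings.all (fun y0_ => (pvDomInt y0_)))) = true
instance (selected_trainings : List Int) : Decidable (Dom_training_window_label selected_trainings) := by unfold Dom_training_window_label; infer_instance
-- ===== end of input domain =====

-- B replaces A's sequential (start, prev) accumulator by positional boundary detection: zip each value with its neighbours, filter run starts and run ends independently, zip them into runs (objective: alternative).


-- ===== PORT A =====
-- formatting of a finished run, as A's f-strings (also reused by port B's generator expression)
def pvFmt (s p : Int) : String :=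
  if s == p then "T" ++ PySem.Int.toStr s else "T" ++ PySem.Int.toStr s ++ "-T" ++ PySem.Int.toStr p

-- A's loop body: state = (runs : List String, start, prev)
def pvStepA (st : List String × Int × Int) (idx0 : Int) : List String × Int × Int :=
  let cur := idx0 + 1
  if cur == st.2.2 + 1 then (st.1, st.2.1, cur)
  else (st.1 ++ [pvFmt st.2.1 st.2.2], cur, cur)

def training_window_label (selected_trainings : List Int) : String :=
  match selected_trainings with
  | [] => "all trainings"
  | [x] => "T" ++ PySem.Int.toStr (x + 1)
  | x :: rest =>
    let init := x + 1
    let r := rest.foldl pvStepA ([], init, init)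
    String.intercalate ", " (r.1 ++ [pvFmt r.2.1 r.2.2])

-- ===== PORT B =====
-- zip(vals, [None] + vals) / zip(vals, vals[1:] + [None]) with the comprehensions' filters
def training_window_label_alt (selected_trainings : List Int) : String :=
  match selected_trainings with
  | [] => "all trainings"
  | _ :: _ =>
    let vals := selected_trainings.map (fun x => x + 1)
    let starts := ((vals.zip ((none : Option Int) :: vals.map some)).filter
        (fun q => q.2.elim true (fun p => !(q.1 == p + 1)))).map Prod.fst
    let ends := ((vals.zip ((vals.drop 1).map some ++ [none])).filter
        (fun q => q.2.elim true (fun n => !(n == q.1 + 1)))).map Prod.fst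
    String.intercalate ", " ((starts.zip ends).map (fun p => pvFmt p.1 p.2))

-- ===== PRECONDITION & SPEC =====
def Spec_training_window_label (selected_trainings : List Int) (out : String) : Prop := out = training_window_label_alt selected_trainings
instance (selected_trainings : List Int) (out : String) : Decidable (Spec_training_window_label selected_trainings out) := by unfold Spec_training_window_label; infer_instance

-- ===== CLAIM (what is proved, stated in full; the proofs are below) =====
def Claim_equal_training_window_label : Prop := ∀ (selected_trainings : List Int), Dom_training_window_label selected_trainings → Spec_training_window_label selected_trainings (training_window_label selected_trainings)

-- ===== LEMMAS AND PROOFS =====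

-- proof-only helpers: the sequential run decomposition both sides are shown to equal
def runsSeq (s e : Int) : List Int → List (Int × Int)
  | [] => [(s, e)]
  | c :: cs => if c == e + 1 then runsSeq s c cs else (s, e) :: runsSeq c c cs

def startsTail (p : Int) : List Int → List Int
  | [] => []
  | c :: cs => if c == p + 1 then startsTail c cs else c :: startsTail c cs

def endsList (p : Int) : List Int → List Int
  | [] => [p]
  | c :: cs => if c == p + 1 then endsList c cs else p :: endsList c cs

lemma starts_eq (vs : List Int) (p : Int) :
    ((vs.zip ((p :: vs).map some)).filter
        (fun q => q.2.elim true (fun r => !(q.1 == r + 1)))).map Prod.fst = startsTail p vs := by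
  induction vs generalizing p with
  | nil => rfl
  | cons c cs ih =>
    have hc := ih c
    simp only [List.map_cons] at hc
    simp only [List.map_cons, List.zip_cons_cons, List.filter_cons, startsTail]
    by_cases h : (c == p + 1) = true
    · simp [h, hc]
    · simp only [Bool.not_eq_true] at h
      simp [h, hc]

lemma starts_full (v : Int) (vs : List Int) :
    (((v :: vs).zip ((none : Option Int) :: (v :: vs).map some)).filter
        (fun q => q.2.elim true (fun p => !(q.1 == p + 1)))).map Prod.fst = v :: startsTail v vs := by
  have h := starts_eq vs v
  simp only [List.map_cons] at h
  simp [h]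

lemma ends_eq (cs : List Int) (p : Int) :
    (((p :: cs).zip (cs.map some ++ [none])).filter
        (fun q => q.2.elim true (fun n => !(n == q.1 + 1)))).map Prod.fst = endsList p cs := by
  induction cs generalizing p with
  | nil => rfl
  | cons c cs ih =>
    simp only [List.map_cons, List.cons_append, List.zip_cons_cons, List.filter_cons, endsList]
    by_cases h : (c == p + 1) = true
    · simp [h, ih c]
    · simp only [Bool.not_eq_true] at h
      simp [h, ih c]

lemma zip_runs (cs : List Int) (s e : Int) :
    (s :: startsTail e cs).zip (endsList e cs) = runsSeq s e cs := by
  induction cs generalizing s e with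
  | nil => rfl
  | cons c cs ih =>
    simp only [startsTail, endsList, runsSeq]
    by_cases h : (c == e + 1) = true
    · simp only [h, if_pos]; exact ih s c
    · simp only [h, Bool.false_eq_true, if_neg, not_false_iff, List.zip_cons_cons]
      rw [ih c c]

lemma foldA (rest : List Int) (done : List String) (s e : Int) :
    (rest.foldl pvStepA (done, s, e)).1
        ++ [pvFmt (rest.foldl pvStepA (done, s, e)).2.1 (rest.foldl pvStepA (done, s, e)).2.2]
      = done ++ (runsSeq s e (rest.map (fun x => x + 1))).map (fun p => pvFmt p.1 p.2) := by
  induction rest generalizing done s e with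
  | nil => simp [runsSeq]
  | cons v vs ih =>
    simp only [List.foldl_cons, List.map_cons, pvStepA, runsSeq]
    by_cases h : (v + 1 == e + 1) = true
    · simp only [h, if_pos]; exact ih done s (v + 1)
    · simp only [h, Bool.false_eq_true, if_neg, not_false_iff]
      rw [ih (done ++ [pvFmt s e]) (v + 1) (v + 1)]
      simp

-- ===== VERDICT (by name: the statement is the Claim_ definition above) =====
theorem training_window_label_spec : Claim_equal_training_window_label := by
  intro xs _
  unfold Spec_training_window_label training_window_label training_window_label_alt
  match xs with
  | [] => rfl
  | [x] =>
    simp only [String.intercalate, pvFmt]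
    simp
    rfl
  | x :: y :: rest =>
    have hA := foldA (y :: rest) [] (x + 1) (x + 1)
    have hS := starts_full (x + 1) ((y + 1) :: rest.map (fun x => x + 1))
    have hE := ends_eq ((y + 1) :: rest.map (fun x => x + 1)) (x + 1)
    have hZ := zip_runs ((y + 1) :: rest.map (fun x => x + 1)) (x + 1) (x + 1)
    simp only [List.map_cons, List.nil_append, List.drop_succ_cons, List.drop_zero] at hA hS hE ⊢
    rw [hA, hS, hE, hZ]
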